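-- pv_equiv track=rewrite | github.com/miguelsantos42/FPRO | FPRO22_23/Testes/Teste modelos/Teste Modelo 1 resolução/ex4.py | primes_difference
-- ===== SOURCE A (Python) =====
-- def is_prime(number):
--     for i in range(2, number):
--         if number % i == 0:
--             return False
--     return True
--
-- def primes_difference(n):
--     smallest = n
--     biggest = n + 1
--     while not (is_prime(smallest)):
--         smallest = smallest - 1
--     while not(is_prime(biggest)):
--         biggest = biggest + 1
--     return biggest - smallest
-- ===== SOURCE B (Python) =====
-- def _is_prime(m):
--     i = 2
--     while i * i <= m:
--         if m % i == 0:
--             return False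
--         i += 1
--     return True
--
-- def primes_difference(n):
--     d = 0
--     while not _is_prime(n - d):
--         d += 1
--     e = 1
--     while not _is_prime(n + e):
--         e += 1
--     return d + e
-- ===== Notes on version B (the rewrite author's own statement) =====
-- stated objective: faster
-- what changed: Primality testing now trial-divides only up to sqrt(m) instead of scanning all of 2..m-1, and the two searches track offsets d (downward) and e (upward) from n, returning d+e instead of subtracting absolute positions.
import Mathlib
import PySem

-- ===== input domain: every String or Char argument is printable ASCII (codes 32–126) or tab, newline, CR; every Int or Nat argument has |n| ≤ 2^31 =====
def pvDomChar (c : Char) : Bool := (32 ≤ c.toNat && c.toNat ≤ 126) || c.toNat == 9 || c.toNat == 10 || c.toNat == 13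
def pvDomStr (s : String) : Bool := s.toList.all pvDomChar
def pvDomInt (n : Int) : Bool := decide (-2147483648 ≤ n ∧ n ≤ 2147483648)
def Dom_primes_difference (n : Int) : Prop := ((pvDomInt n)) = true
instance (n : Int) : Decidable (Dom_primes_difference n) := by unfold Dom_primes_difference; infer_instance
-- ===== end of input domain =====

-- B: gap between nearest primes below (≤ n) and above (> n); B trial-divides only up to √m and
-- tracks offsets from n — measurably faster (asymptotically cheaper primality check).


-- ===== PORT A =====
-- is_prime(number): scans range(2, number); early 'return False' = .any over the same list
def pvIsPrimeA (number : Int) : Bool :=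
  !((PySem.List.pyRange 2 number 1).any (fun i => PySem.Int.mod number i == 0))

-- small termination helpers (term-mode proofs, used by the ports' decreasing_by)
theorem pvTN0 (y : Int) (h : 0 < y) : (y - 1).toNat < y.toNat :=
  (Int.toNat_lt_toNat h).mpr (sub_one_lt y)

theorem pvTN1 (x c : Int) (h : c < x) : (x - 1 - c).toNat < (x - c).toNat := by
  rw [sub_right_comm]
  exact pvTN0 (x - c) (Int.sub_pos.mpr h)

theorem pvTN2 (x i : Int) (h : i < x) : (x - (i + 1)).toNat < (x - i).toNat := by
  rw [sub_add_eq_sub_sub]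
  exact pvTN0 (x - i) (Int.sub_pos.mpr h)

theorem pvLeMulSelf (i : Int) : i ≤ i * i :=
  if h : i ≤ 0 then le_trans h (mul_self_nonneg i)
  else (le_mul_iff_one_le_left (lt_of_not_ge h)).mpr
    (le_of_eq_of_le (zero_add 1).symm (Int.lt_iff_add_one_le.mp (lt_of_not_ge h)))

-- A's is_prime is true on every s ≤ 2 (range(2, s) is empty)
theorem pvIsPrimeA_le_two (s : Int) (h : s ≤ 2) : pvIsPrimeA s = true := by
  unfold pvIsPrimeA
  rw [PySem.List.pyRange_one_eq_nil h]
  rfl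

-- Euclid: some integer ≥ b passes A's trial division (upward-loop measure)
theorem pvExistsPrimeA (b : Int) : ∃ k : Nat, pvIsPrimeA (b + (k : Int)) = true := by
  obtain ⟨p, hle, hp⟩ := Nat.exists_infinite_primes (b.toNat + 2)
  have hbp : b ≤ (p : Int) :=
    le_trans (Int.self_le_toNat b) (Nat.cast_le.mpr (le_trans (Nat.le_add_right _ 2) hle))
  refine ⟨((p : Int) - b).toNat, ?_⟩
  rw [Int.toNat_of_nonneg (sub_nonneg.mpr hbp), add_comm, sub_add_cancel]
  have hnone : ∀ i ∈ PySem.List.pyRange 2 (p : Int) 1, ¬(PySem.Int.mod (p : Int) i == 0) = true := by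
    intro i hi hmod
    obtain ⟨h2, hlt⟩ := PySem.List.mem_pyRange_one.mp hi
    have hdvd : i ∣ (p : Int) := (PySem.Int.mod_eq_zero_iff_dvd _ _).mp (beq_iff_eq.mp hmod)
    have h0 : (0:Int) ≤ i := le_trans (by norm_num) h2
    have hdn : i.toNat ∣ p := Int.natCast_dvd_natCast.mp (by rwa [Int.toNat_of_nonneg h0])
    have hcast : (i.toNat : Int) = i := Int.toNat_of_nonneg h0
    rcases hp.eq_one_or_self_of_dvd _ hdn with h1 | h1
    · rw [h1] at hcast; exact absurd (hcast ▸ h2) (by norm_num)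
    · rw [h1] at hcast; exact absurd (hcast ▸ hlt) (lt_irrefl _)
  unfold pvIsPrimeA
  rw [List.any_eq_false.mpr hnone]; rfl

-- one generic step lemma for both upward while-loops
theorem pvUpTerm (P : Int → Bool) (E : ∀ b : Int, ∃ k : Nat, P (b + (k : Int)) = true)
    (b : Int) (h : ¬ P b = true) : Nat.find (E (b + 1)) < Nat.find (E b) := by
  have h0 : Nat.find (E b) ≠ 0 := fun h0 => h (by
    have hs := Nat.find_spec (E b)
    rwa [h0, Nat.cast_zero, add_zero] at hs)
  obtain ⟨k, hk⟩ := Nat.exists_eq_succ_of_ne_zero h0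
  have hs := Nat.find_spec (E b)
  rw [hk] at hs
  have hshift : P ((b + 1) + (k : Int)) = true := by
    rwa [Nat.cast_succ, ← add_assoc, add_right_comm] at hs
  exact hk ▸ Nat.lt_succ_of_le (Nat.find_le hshift)

-- while not is_prime(smallest): smallest -= 1
def pvDownA (s : Int) : Int :=
  if pvIsPrimeA s then s else pvDownA (s - 1)
termination_by (s - 2).toNat
decreasing_by rename_i h; exact pvTN1 s 2 (lt_of_not_ge fun hle => h (pvIsPrimeA_le_two s hle))

-- while not is_prime(biggest): biggest += 1
def pvUpA (b : Int) : Int :=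
  if pvIsPrimeA b then b else pvUpA (b + 1)
termination_by Nat.find (pvExistsPrimeA b)
decreasing_by rename_i h; exact pvUpTerm pvIsPrimeA pvExistsPrimeA b h

def primes_difference (n : Int) : Int :=
  pvUpA (n + 1) - pvDownA n

-- ===== PORT B =====
-- _is_prime: i from 2 while i*i <= m
def pvGoB (m i : Int) : Bool :=
  if i * i ≤ m then
    (if PySem.Int.mod m i == 0 then false else pvGoB m (i + 1))
  else true
termination_by (m + 1 - i).toNat
decreasing_by
  rename_i h _
  exact pvTN2 (m + 1) i (lt_of_le_of_lt (le_trans (pvLeMulSelf i) h) (lt_add_one m))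

def pvIsPrimeB (m : Int) : Bool := pvGoB m 2

-- B's test is true on every s ≤ 3 (the loop guard 2*2 ≤ s fails at once)
theorem pvIsPrimeB_le_three (s : Int) (h : s ≤ 3) : pvIsPrimeB s = true := by
  unfold pvIsPrimeB
  rw [pvGoB, if_neg (fun hc => absurd (le_trans hc h) (by norm_num))]

-- a prime passes B's square-root trial division, whatever the start index ≥ 2
theorem pvGoB_prime (p : Nat) (hp : p.Prime) (i : Int) (hi : 2 ≤ i) :
    pvGoB (p : Int) i = true := by
  fun_induction pvGoB (p : Int) i with
  | case1 i h1 h2 =>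
    have hdvd : i ∣ (p : Int) := (PySem.Int.mod_eq_zero_iff_dvd _ _).mp (beq_iff_eq.mp h2)
    have h0 : (0:Int) ≤ i := le_trans (by norm_num) hi
    have hdn : i.toNat ∣ p := Int.natCast_dvd_natCast.mp (by rwa [Int.toNat_of_nonneg h0])
    have hcast : (i.toNat : Int) = i := Int.toNat_of_nonneg h0
    rcases hp.eq_one_or_self_of_dvd _ hdn with h1' | h1'
    · rw [h1'] at hcast; exact absurd (hcast ▸ hi) (by norm_num)
    · rw [h1'] at hcast
      have hp1 : (1:Int) < (p : Int) := by exact_mod_cast hp.one_lt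
      have hlt : (p : Int) < (p : Int) * (p : Int) :=
        (lt_mul_iff_one_lt_left (lt_trans zero_lt_one hp1)).mpr hp1
      rw [← hcast] at h1
      exact absurd h1 (not_le.mpr hlt)
  | case2 i h1 h2 ih =>
    exact ih (le_trans hi (le_add_of_nonneg_right zero_le_one))
  | case3 i h1 => rfl

-- Euclid for B's upward loop, self-contained on B's side
theorem pvExistsPrimeB (b : Int) : ∃ k : Nat, pvIsPrimeB (b + (k : Int)) = true := by
  obtain ⟨p, hle, hp⟩ := Nat.exists_infinite_primes (b.toNat + 2)
  have hbp : b ≤ (p : Int) :=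
    le_trans (Int.self_le_toNat b) (Nat.cast_le.mpr (le_trans (Nat.le_add_right _ 2) hle))
  refine ⟨((p : Int) - b).toNat, ?_⟩
  rw [Int.toNat_of_nonneg (sub_nonneg.mpr hbp), add_comm, sub_add_cancel]
  exact pvGoB_prime p hp 2 le_rfl

-- d = 0; while not _is_prime(n - d): d += 1
def pvDownB (n d : Int) : Int :=
  if pvIsPrimeB (n - d) then d else pvDownB n (d + 1)
termination_by (n - 3 - d).toNat
decreasing_by
  rename_i h
  exact pvTN2 (n - 3) d (lt_sub_comm.mp (lt_of_not_ge fun hle => h (pvIsPrimeB_le_three _ hle)))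

-- e = 1; while not _is_prime(n + e): e += 1
def pvUpB (n e : Int) : Int :=
  if pvIsPrimeB (n + e) then e else pvUpB n (e + 1)
termination_by Nat.find (pvExistsPrimeB (n + e))
decreasing_by
  rename_i h
  rw [← add_assoc]
  exact pvUpTerm pvIsPrimeB pvExistsPrimeB (n + e) h

def primes_difference_alt (n : Int) : Int :=
  pvDownB n 0 + pvUpB n 1

-- ===== PRECONDITION & SPEC =====
def Spec_primes_difference (n : Int) (out : Int) : Prop := out = primes_difference_alt n
instance (n : Int) (out : Int) : Decidable (Spec_primes_difference n out) := by unfold Spec_primes_difference; infer_instance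

-- ===== CLAIM (what is proved, stated in full; the proofs are below) =====
def Claim_equal_primes_difference : Prop := ∀ (n : Int), Dom_primes_difference n → Spec_primes_difference n (primes_difference n)

-- ===== LEMMAS AND PROOFS =====

theorem pvIsPrimeA_iff (n : Int) :
    pvIsPrimeA n = true ↔ ∀ i : Int, 2 ≤ i → i < n → ¬ i ∣ n := by
  simp only [pvIsPrimeA, Bool.not_eq_eq_eq_not, Bool.not_true, List.any_eq_false,
    PySem.List.mem_pyRange_one, beq_iff_eq, PySem.Int.mod_eq_zero_iff_dvd]
  constructor
  · intro h i h2 hlt hdvd; exact (h i ⟨h2, hlt⟩) hdvd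
  · intro h i ⟨h2, hlt⟩ hdvd; exact h i h2 hlt hdvd

theorem pvGoB_iff (m i : Int) (hi : 2 ≤ i) :
    pvGoB m i = true ↔ ∀ j : Int, i ≤ j → j * j ≤ m → ¬ j ∣ m := by
  fun_induction pvGoB m i with
  | case1 i h1 h2 =>
    simp only [Bool.false_eq_true, false_iff]
    intro hall
    exact hall i le_rfl h1 ((PySem.Int.mod_eq_zero_iff_dvd m i).mp (by simpa using h2))
  | case2 i h1 h2 ih =>
    rw [ih (by omega)]
    constructor
    · intro h j hij hjj hdvd
      rcases eq_or_lt_of_le hij with heq | hlt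
      · subst heq
        exact h2 (by simpa using (PySem.Int.mod_eq_zero_iff_dvd m _).mpr hdvd)
      · exact h j (by omega) hjj hdvd
    · intro h j hij hjj; exact h j (by omega) hjj
  | case3 i h1 =>
    constructor
    · intro _ j hij hjj hdvd
      have hjj2 : i * i ≤ j * j := by nlinarith
      omega
    · intro _; rfl

theorem pvIsPrimeB_iff (m : Int) :
    pvIsPrimeB m = true ↔ ∀ j : Int, 2 ≤ j → j * j ≤ m → ¬ j ∣ m :=
  pvGoB_iff m 2 le_rfl

-- the two trial-division tests agree: a proper divisor exists iff one with square ≤ n exists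
theorem pvIsPrime_eq (s : Int) : pvIsPrimeA s = pvIsPrimeB s := by
  have hiff : pvIsPrimeA s = true ↔ pvIsPrimeB s = true := by
    rw [pvIsPrimeA_iff, pvIsPrimeB_iff]
    constructor
    · intro h i h2 hii hdvd
      have : i < s := by nlinarith
      exact h i h2 this hdvd
    · intro h i h2 hlt hdvd
      obtain ⟨k, hk⟩ := hdvd
      have hspos : (0:Int) < s := by omega
      have hkpos : 0 < k := by nlinarith
      have hk1 : k ≠ 1 := by intro h1; rw [h1, mul_one] at hk; omega
      have hk2 : 2 ≤ k := by omega
      by_cases hii : i * i ≤ s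
      · exact h i h2 hii ⟨k, hk⟩
      · have hki : k < i := by nlinarith
        have hkk : k * k ≤ s := by nlinarith
        exact h k hk2 hkk ⟨i, by rw [hk]; ring⟩
  exact Bool.coe_iff_coe.mp hiff

theorem pvDown_eq (n d : Int) : pvDownA (n - d) = n - pvDownB n d := by
  fun_induction pvDownB n d with
  | case1 d h =>
    rw [pvDownA, if_pos (by rw [pvIsPrime_eq]; exact h)]
  | case2 d h ih =>
    rw [pvDownA, if_neg (by rw [pvIsPrime_eq]; exact h)]
    rw [show n - d - 1 = n - (d + 1) by ring]; exact ih

theorem pvUp_eq (n e : Int) : pvUpA (n + e) = n + pvUpB n e := by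
  fun_induction pvUpB n e with
  | case1 e h =>
    rw [pvUpA, if_pos (by rw [pvIsPrime_eq]; exact h)]
  | case2 e h ih =>
    rw [pvUpA, if_neg (by rw [pvIsPrime_eq]; exact h)]
    rw [show n + e + 1 = n + (e + 1) by ring]; exact ih

-- ===== VERDICT (by name: the statement is the Claim_ definition above) =====
theorem primes_difference_spec : Claim_equal_primes_difference := by
  intro n _
  unfold Spec_primes_difference primes_difference primes_difference_alt
  have hd := pvDown_eq n 0
  have hu := pvUp_eq n 1
  rw [show n - 0 = n by ring] at hd
  rw [hd, hu]; ring
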